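-- pv_equiv track=rewrite | github.com/rising-y17/external-exam | doheon/quiz_parser.py | parse_quiz_block
-- ===== SOURCE A (Python) =====
-- def parse_quiz_block(text_block: str):
--     """
--     한 문항 블록을 파싱하여 문제, 정답, 힌트를 추출합니다.
--     - 일반 줄  → 문제 본문 누적
--     - ':!' 줄  → 힌트 (마지막 값으로 갱신)
--     - ':=' 줄  → 정답 ('||' 로 다중 정답)
--     """
--     lines = text_block.splitlines()
--
--     # 선행/후행 빈 줄 제거
--     i = 0
--     while i < len(lines) and not lines[i].strip():
--         i += 1
--     lines = lines[i:]
--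
--     j = len(lines) - 1
--     while j >= 0 and not lines[j].strip():
--         j -= 1
--     lines = lines[:j+1]
--
--     q_lines, answers, hint = [], [], None
--
--     for raw in lines:
--         line = raw.rstrip("\n")
--         s = line.strip()
--
--         if not s:
--             q_lines.append("")
--             continue
--
--         if s.startswith(":!"):
--             hint = s[2:].strip() or None
--         elif s.startswith(":="):
--             cand = [a.strip() for a in s[2:].split("||") if a.strip()]
--             if cand:
--                 answers = cand
--         elif s.startswith(":+"):
--             continue
--         else:
--             q_lines.append(line)
--
--     question_text = "\n".join(q_lines).strip()
--     return question_text, answers, hint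
-- ===== SOURCE B (Python) =====
-- def parse_quiz_block(text_block: str):
--     """Same parse, decomposed: one reversed early-exit scan per directive plus a
--     filter/join for the question body; the final strip makes edge-blank trimming unnecessary."""
--     lines = text_block.splitlines()
--
--     hint = None
--     for line in reversed(lines):
--         s = line.strip()
--         if s.startswith(":!"):
--             hint = s[2:].strip() or None
--             break
--
--     answers = []
--     for line in reversed(lines):
--         s = line.strip()
--         if s.startswith(":="):
--             cand = [a.strip() for a in s[2:].split("||") if a.strip()]
--             if cand:
--                 answers = cand
--                 break
--
--     body = "\n".join(
--         "" if not line.strip() else line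
--         for line in lines
--         if not line.strip() or not line.strip().startswith((":!", ":=", ":+"))
--     )
--     return body.strip(), answers, hint
-- ===== Notes on version B (the rewrite author's own statement) =====
-- stated objective: alternative
-- what changed: Replaces A's trim-then-single-classifying-loop (threading question/answers/hint state together) with three independent passes: a reversed early-exit scan for the hint directive, a reversed early-exit scan for the first non-empty answer-candidate list, and a filter/map/join for the question body, dropping the edge-blank-line trimming, which the final strip makes redundant.
import Mathlib
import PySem

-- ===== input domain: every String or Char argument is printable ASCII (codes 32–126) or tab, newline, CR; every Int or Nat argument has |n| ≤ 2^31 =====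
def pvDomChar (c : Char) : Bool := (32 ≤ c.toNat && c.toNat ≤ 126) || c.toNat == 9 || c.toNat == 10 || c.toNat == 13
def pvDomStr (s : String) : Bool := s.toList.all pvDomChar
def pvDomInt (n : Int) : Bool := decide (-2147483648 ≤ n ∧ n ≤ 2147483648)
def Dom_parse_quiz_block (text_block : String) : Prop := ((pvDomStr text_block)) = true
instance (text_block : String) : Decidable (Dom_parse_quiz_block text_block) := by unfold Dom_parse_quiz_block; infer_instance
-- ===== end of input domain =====

-- B recomputes question/answers/hint in three independent passes (two reversed early-exit
-- scans and one filter/join) instead of A's edge-trim plus single classifying loop; same values, same cost.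


-- ===== PORT A =====
-- truthiness test "not line.strip()" used by A's trimming loops
def pvBlank (l : List Char) : Bool := PySem.Chars.strip l == []

-- hand port of raw.rstrip("\n") (drop trailing '\n' characters); exact: Python strips
-- exactly the maximal suffix of characters from the argument set
def pvRstripNl (l : List Char) : List Char := (l.reverse.dropWhile (fun c => c == '\n')).reverse

-- [a.strip() for a in s[2:].split("||") if a.strip()]  (shared text in both Pythons)
def pvCand (s : List Char) : List (List Char) :=
  ((PySem.Chars.splitOn (PySem.Chars.slice s (some 2) none) ['|', '|']).filter
      (fun a => !(PySem.Chars.strip a == []))).map PySem.Chars.strip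

-- s[2:].strip() or None  (shared text in both Pythons)
def pvHintVal (s : List Char) : Option (List Char) :=
  let h := PySem.Chars.strip (PySem.Chars.slice s (some 2) none)
  if h == [] then none else some h

-- port of "while i < len(lines) and not lines[i].strip(): i += 1" followed by "lines = lines[i:]"
def pvA_dropLead : List (List Char) → List (List Char)
  | [] => []
  | l :: ls => if pvBlank l then pvA_dropLead ls else l :: ls

-- port of "j = len(lines)-1; while j >= 0 and not lines[j].strip(): j -= 1"; argument is j+1, result is j+1
def pvA_endLen (lines : List (List Char)) : Nat → Nat
  | 0 => 0
  | k+1 => if pvBlank (lines.getD k []) then pvA_endLen lines k else k + 1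

-- the body of A's "for raw in lines" loop, acting on the state (q_lines, answers, hint)
def pvA_step (st : List (List Char) × List (List Char) × Option (List Char)) (raw : List Char) :
    List (List Char) × List (List Char) × Option (List Char) :=
  let line := pvRstripNl raw
  let s := PySem.Chars.strip line
  if s == [] then (st.1 ++ [[]], st.2.1, st.2.2)
  else if PySem.Chars.startswith s [':', '!'] then (st.1, st.2.1, pvHintVal s)
  else if PySem.Chars.startswith s [':', '='] then
    let cand := pvCand s
    (st.1, if cand == [] then st.2.1 else cand, st.2.2)
  else if PySem.Chars.startswith s [':', '+'] then st
  else (st.1 ++ [line], st.2.1, st.2.2)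

def parse_quiz_block (text_block : String) : String × List String × Option String :=
  let lines0 := PySem.Chars.splitlines text_block.toList
  let lines1 := pvA_dropLead lines0
  let lines := lines1.take (pvA_endLen lines1 lines1.length)
  let r := lines.foldl pvA_step ([], [], none)
  (String.ofList (PySem.Chars.strip (PySem.Chars.join ['\n'] r.1)),
   r.2.1.map String.ofList, r.2.2.map String.ofList)

-- ===== PORT B =====
-- predicate of B's reversed hint scan
def pvB_isHint (l : List Char) : Bool := PySem.Chars.startswith (PySem.Chars.strip l) [':', '!']

-- B's first reversed loop with break = find? on the reversed list
def pvB_hint (lines : List (List Char)) : Option (List Char) :=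
  match lines.reverse.find? pvB_isHint with
  | some l => pvHintVal (PySem.Chars.strip l)
  | none => none

-- predicate of B's reversed answers scan (":=" line whose candidate list is non-empty)
def pvB_isAns (l : List Char) : Bool :=
  PySem.Chars.startswith (PySem.Chars.strip l) [':', '='] &&
    !(pvCand (PySem.Chars.strip l) == [])

def pvB_answers (lines : List (List Char)) : List (List Char) :=
  match lines.reverse.find? pvB_isAns with
  | some l => pvCand (PySem.Chars.strip l)
  | none => []

-- B's generator: filter (blank or not a directive), map (blank → "", else the line)
def pvB_keep (l : List Char) : Bool :=
  let s := PySem.Chars.strip l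
  (s == []) ||
    !(PySem.Chars.startswith s [':', '!'] || PySem.Chars.startswith s [':', '='] ||
      PySem.Chars.startswith s [':', '+'])

def pvB_q (l : List Char) : List Char := if PySem.Chars.strip l == [] then [] else l

def parse_quiz_block_alt (text_block : String) : String × List String × Option String :=
  let lines := PySem.Chars.splitlines text_block.toList
  let body := PySem.Chars.join ['\n'] ((lines.filter pvB_keep).map pvB_q)
  (String.ofList (PySem.Chars.strip body),
   (pvB_answers lines).map String.ofList, (pvB_hint lines).map String.ofList)

-- ===== PRECONDITION & SPEC =====
def Spec_parse_quiz_block (text_block : String) (out : String × List String × Option String) : Prop := out = parse_quiz_block_alt text_block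
instance (text_block : String) (out : String × List String × Option String) : Decidable (Spec_parse_quiz_block text_block out) := by unfold Spec_parse_quiz_block; infer_instance

-- ===== CLAIM (what is proved, stated in full; the proofs are below) =====
def Claim_equal_parse_quiz_block : Prop := ∀ (text_block : String), Dom_parse_quiz_block text_block → Spec_parse_quiz_block text_block (parse_quiz_block text_block)


-- ===== LEMMAS AND PROOFS =====

-- every character of a line produced by splitlines.go fails the line-break predicate
theorem pv_go_chars (isB : Char → Bool) (s : List Char) (cur : List Char) (acc : List (List Char))
    (h1 : ∀ c ∈ cur, isB c = false) (h2 : ∀ l ∈ acc, ∀ c ∈ l, isB c = false) :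
    ∀ l ∈ PySem.Chars.splitlines.go isB s cur acc, ∀ c ∈ l, isB c = false := by
  fun_induction PySem.Chars.splitlines.go isB s cur acc
  case case1 =>
    intro l hl; exact h2 l (by simpa using hl)
  case case2 =>
    intro l hl
    simp only [List.mem_reverse, List.mem_cons] at hl
    rcases hl with rfl | hl
    · intro c hc; exact h1 c (by simpa using hc)
    · exact h2 l hl
  case case3 ih =>
    refine ih ?_ ?_
    · simp
    · intro l hl
      rcases List.mem_cons.1 hl with rfl | hl
      · intro c hc; exact h1 c (by simpa using hc)
      · exact h2 l hl
  case case4 ih =>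
    refine ih ?_ ?_
    · simp
    · intro l hl
      rcases List.mem_cons.1 hl with rfl | hl
      · intro c hc; exact h1 c (by simpa using hc)
      · exact h2 l hl
  case case5 c rest hmatch hc ih =>
    refine ih ?_ h2
    intro d hd
    rcases List.mem_cons.1 hd with rfl | hd
    · simpa using hc
    · exact h1 d hd

-- lines produced by splitlines carry no '\n', so A's rstrip("\n") is the identity there
theorem pv_splitlines_rstripNl {cs : List Char} {l : List Char}
    (hl : l ∈ PySem.Chars.splitlines cs) : pvRstripNl l = l := by
  have hchars := pv_go_chars _ cs [] [] (by simp) (by simp) l (by simpa [PySem.Chars.splitlines] using hl)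
  have hnl : ∀ c ∈ l.reverse, (c == '\n') = false := by
    intro c hc
    have := hchars c (List.mem_reverse.1 hc)
    rw [beq_eq_false_iff_ne]
    rintro rfl
    revert this; decide
  unfold pvRstripNl
  cases hrev : l.reverse with
  | nil => simpa using congrArg List.reverse hrev.symm
  | cons a t =>
      have ha : (a == '\n') = false := hnl a (by simp [hrev])
      rw [List.dropWhile_cons, ha]
      simpa using congrArg List.reverse hrev.symm

theorem pv_sw_second {s : List Char} {c d : Char}
    (h : PySem.Chars.startswith s [':', c] = true) (hne : (d == c) = false) :
    PySem.Chars.startswith s [':', d] = false := by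
  have hpre : [':', c] <+: s := (PySem.Chars.startswith_iff s [':', c]).1 h
  obtain ⟨t, rfl⟩ := hpre
  simp [PySem.Chars.startswith, List.isPrefixOf, hne]

-- one step of A's loop, on a line without trailing '\n', written through B's classifiers
theorem pv_step_eval (st : List (List Char) × List (List Char) × Option (List Char))
    (x : List Char) (hx : pvRstripNl x = x) :
    pvA_step st x =
      (st.1 ++ (if pvB_keep x then [pvB_q x] else []),
       (if pvB_isAns x then pvCand (PySem.Chars.strip x) else st.2.1),
       (if pvB_isHint x then pvHintVal (PySem.Chars.strip x) else st.2.2)) := by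
  obtain ⟨q, a, h⟩ := st
  simp only [pvA_step, hx, pvB_keep, pvB_q, pvB_isAns, pvB_isHint]
  by_cases hnil : (PySem.Chars.strip x == []) = true
  · have hs : PySem.Chars.strip x = [] := by simpa using hnil
    simp [hs, show PySem.Chars.startswith [] [':', '!'] = false from rfl,
      show PySem.Chars.startswith [] [':', '='] = false from rfl,
      show PySem.Chars.startswith [] [':', '+'] = false from rfl]
  · rw [Bool.not_eq_true] at hnil
    by_cases hH : PySem.Chars.startswith (PySem.Chars.strip x) [':', '!'] = true
    · have h2 := pv_sw_second (d := '=') hH (by decide)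
      simp [hnil, hH, h2]
    · rw [Bool.not_eq_true] at hH
      by_cases hA : PySem.Chars.startswith (PySem.Chars.strip x) [':', '='] = true
      · have h3 := pv_sw_second (d := '+') hA (by decide)
        by_cases hc : (pvCand (PySem.Chars.strip x) == []) = true
        · simp [hnil, hH, hA, h3, hc]
        · rw [Bool.not_eq_true] at hc
          simp [hnil, hH, hA, h3, hc]
      · rw [Bool.not_eq_true] at hA
        by_cases hP : PySem.Chars.startswith (PySem.Chars.strip x) [':', '+'] = true
        · simp [hnil, hH, hA, hP]
        · rw [Bool.not_eq_true] at hP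
          simp [hnil, hH, hA, hP]

-- A's whole loop, over lines without trailing '\n', as three independent passes
theorem pv_fold_eval (L : List (List Char)) (hL : ∀ x ∈ L, pvRstripNl x = x) :
    ∀ (q a : List (List Char)) (h : Option (List Char)),
    L.foldl pvA_step (q, a, h) =
      (q ++ (L.filter pvB_keep).map pvB_q,
       (match L.reverse.find? pvB_isAns with
        | some l => pvCand (PySem.Chars.strip l) | none => a),
       (match L.reverse.find? pvB_isHint with
        | some l => pvHintVal (PySem.Chars.strip l) | none => h)) := by
  induction L with
  | nil => intro q a h; simp
  | cons x L ih =>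
      intro q a h
      have hx := hL x (List.mem_cons_self ..)
      have hL' : ∀ y ∈ L, pvRstripNl y = y := fun y hy => hL y (List.mem_cons_of_mem _ hy)
      rw [List.foldl_cons, pv_step_eval _ x hx]
      rw [ih hL']
      refine Prod.ext ?_ (Prod.ext ?_ ?_)
      · simp [List.filter_cons, List.append_assoc]
        by_cases hk : pvB_keep x = true <;> simp [hk]
      · simp only [List.reverse_cons, List.find?_append]
        cases hf : L.reverse.find? pvB_isAns with
        | some l => simp [Option.or]
        | none =>
            by_cases hax : pvB_isAns x = true
            · simp [hax]
            · have hax' : pvB_isAns x = false := by simpa using hax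
              simp [hax']
      · simp only [List.reverse_cons, List.find?_append]
        cases hf : L.reverse.find? pvB_isHint with
        | some l => simp [Option.or]
        | none =>
            by_cases hhx : pvB_isHint x = true
            · simp [hhx]
            · have hhx' : pvB_isHint x = false := by simpa using hhx
              simp [hhx']

-- A's leading-blank trim is dropWhile
theorem pv_dropLead_eq (L : List (List Char)) : pvA_dropLead L = L.dropWhile pvBlank := by
  induction L with
  | nil => rfl
  | cons l ls ih =>
      rw [pvA_dropLead, List.dropWhile_cons]
      by_cases h : pvBlank l = true <;> simp [h, ih]

theorem pv_endLen_le (L : List (List Char)) (k : Nat) : pvA_endLen L k ≤ k := by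
  induction k with
  | zero => simp [pvA_endLen]
  | succ k ih =>
      rw [pvA_endLen]
      by_cases h : pvBlank (L.getD k []) = true
      · rw [if_pos h]; omega
      · rw [if_neg h]

theorem pv_endLen_append (L : List (List Char)) (x : List Char) (k : Nat) (hk : k ≤ L.length) :
    pvA_endLen (L ++ [x]) k = pvA_endLen L k := by
  induction k with
  | zero => rfl
  | succ k ih =>
      rw [pvA_endLen, pvA_endLen, List.getD_append _ _ _ k (by omega)]
      by_cases h : pvBlank (L.getD k []) = true
      · rw [if_pos h, if_pos h, ih (by omega)]
      · rw [if_neg h, if_neg h]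

-- A's trailing-blank trim is reverse-dropWhile-reverse
theorem pv_take_endLen (L : List (List Char)) :
    L.take (pvA_endLen L L.length) = (L.reverse.dropWhile pvBlank).reverse := by
  induction L using List.reverseRecOn with
  | nil => rfl
  | append_singleton L x ih =>
      have hlen : (L ++ [x]).length = L.length + 1 := by simp
      have hx : (L ++ [x]).getD L.length [] = x := by
        simp [List.getD_eq_getElem?_getD]
      rw [List.reverse_append, List.reverse_singleton, List.singleton_append,
        List.dropWhile_cons, hlen, pvA_endLen, hx]
      by_cases h : pvBlank x = true
      · rw [if_pos h, if_pos h, pv_endLen_append L x L.length (le_refl _),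
          List.take_append_of_le_length (pv_endLen_le L L.length), ih]
      · rw [if_neg h, if_neg h, List.take_of_length_le (by simp)]
        simp

-- blank lines (strip == "") are never directives and contribute "" to the question
theorem pv_blank_keep {l : List Char} (h : pvBlank l = true) : pvB_keep l = true := by
  simp only [pvBlank, beq_iff_eq] at h
  simp [pvB_keep, h]

theorem pv_blank_q {l : List Char} (h : pvBlank l = true) : pvB_q l = [] := by
  simp only [pvBlank, beq_iff_eq] at h
  simp [pvB_q, h]

theorem pv_blank_not_isHint {l : List Char} (h : pvBlank l = true) : pvB_isHint l = false := by
  simp only [pvBlank, beq_iff_eq] at h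
  simp only [pvB_isHint, h]; rfl

theorem pv_blank_not_isAns {l : List Char} (h : pvBlank l = true) : pvB_isAns l = false := by
  simp only [pvBlank, beq_iff_eq] at h
  simp only [pvB_isAns, h]
  rw [show PySem.Chars.startswith [] [':', '='] = false from rfl]
  rfl

-- dropping a leading '\n' does not change strip
theorem pv_strip_cons_nl (z : List Char) :
    PySem.Chars.strip ('\n' :: z) = PySem.Chars.strip z := by
  simp [PySem.Chars.strip, PySem.Chars.lstrip,
    show PySem.Chars.isspace '\n' = true from by decide]

-- dropping a trailing '\n' does not change strip
theorem pv_strip_append_nl (z : List Char) :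
    PySem.Chars.strip (z ++ ['\n']) = PySem.Chars.strip z := by
  simp only [PySem.Chars.strip, PySem.Chars.lstrip, PySem.Chars.rstrip, List.dropWhile_append]
  by_cases h : (List.dropWhile PySem.Chars.isspace z).isEmpty = true
  · simp [show PySem.Chars.isspace '\n' = true from by decide,
      List.isEmpty_iff.1 h]
  · simp only [h]
    rw [if_neg (by simp)]
    rw [List.reverse_append]
    simp [show PySem.Chars.isspace '\n' = true from by decide]

theorem pv_join_append_nil (Q : List (List Char)) (hQ : Q ≠ []) :
    PySem.Chars.join ['\n'] (Q ++ [[]]) = PySem.Chars.join ['\n'] Q ++ ['\n'] := by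
  induction Q with
  | nil => simp at hQ
  | cons x xs ih =>
      cases xs with
      | nil => simp [PySem.Chars.join_cons_cons, PySem.Chars.join_singleton]
      | cons y ys =>
          have h1 : (x :: y :: ys) ++ [[]] = x :: y :: (ys ++ [([] : List Char)]) := by simp
          have h2 : (y :: ys) ++ [[]] = y :: (ys ++ [([] : List Char)]) := by simp
          rw [h1, PySem.Chars.join_cons_cons, ← h2, ih (by simp), PySem.Chars.join_cons_cons]
          simp [List.append_assoc]

theorem pv_strip_join_left (m : Nat) (Q : List (List Char)) :
    PySem.Chars.strip (PySem.Chars.join ['\n'] (List.replicate m [] ++ Q)) =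
      PySem.Chars.strip (PySem.Chars.join ['\n'] Q) := by
  induction m with
  | zero => simp
  | succ m ih =>
      rw [List.replicate_succ, List.cons_append]
      cases hR : List.replicate m ([] : List Char) ++ Q with
      | nil =>
          have : Q = [] := by
            cases m <;> simp_all [List.replicate_succ]
          simp [this, PySem.Chars.join_singleton, PySem.Chars.join_nil]
      | cons y ys =>
          rw [PySem.Chars.join_cons_cons, List.nil_append, List.singleton_append,
            pv_strip_cons_nl, ← hR, ih]

theorem pv_strip_join_right (n : Nat) (Q : List (List Char)) :
    PySem.Chars.strip (PySem.Chars.join ['\n'] (Q ++ List.replicate n [])) =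
      PySem.Chars.strip (PySem.Chars.join ['\n'] Q) := by
  induction n with
  | zero => simp
  | succ n ih =>
      rw [show List.replicate (n+1) ([] : List Char) = List.replicate n [] ++ [[]] from by
        simp [List.replicate_succ'], ← List.append_assoc]
      by_cases h : Q ++ List.replicate n ([] : List Char) = []
      · have hQ : Q = [] := (List.append_eq_nil_iff.1 h).1
        rw [h, hQ]
        simp [PySem.Chars.join_singleton, PySem.Chars.join_nil]
      · rw [pv_join_append_nil _ h, pv_strip_append_nl, ih]

-- X.find? p = none on a list of blank lines, for a predicate false on blanks
theorem pv_find_blank_none {X : List (List Char)} {p : List Char → Bool}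
    (hb : ∀ l ∈ X, pvBlank l = true) (hp : ∀ l, pvBlank l = true → p l = false) :
    X.find? p = none :=
  List.find?_eq_none.2 (fun x hx => by simp [hp x (hb x hx)])

-- ===== VERDICT (by name: the statement is the Claim_ definition above) =====
theorem parse_quiz_block_spec : Claim_equal_parse_quiz_block := by
  intro tb _
  unfold Spec_parse_quiz_block
  simp only [parse_quiz_block, parse_quiz_block_alt]
  have hNl : ∀ x ∈ PySem.Chars.splitlines tb.toList, pvRstripNl x = x :=
    fun x hx => pv_splitlines_rstripNl hx
  set lines0 := PySem.Chars.splitlines tb.toList with hcs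
  set t := lines0.takeWhile pvBlank with ht
  set M := lines0.dropWhile pvBlank with hM
  set LT := (M.reverse.dropWhile pvBlank).reverse with hLT
  set u := (M.reverse.takeWhile pvBlank).reverse with hu
  have hdec : lines0 = t ++ (LT ++ u) := by
    conv_lhs => rw [← List.takeWhile_append_dropWhile (p := pvBlank) (l := lines0)]
    rw [← ht, ← hM]
    congr 1
    conv_lhs => rw [← List.reverse_reverse M,
      ← List.takeWhile_append_dropWhile (p := pvBlank) (l := M.reverse), List.reverse_append]
  have hbt : ∀ l ∈ t, pvBlank l = true := fun l hl => List.mem_takeWhile_imp hl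
  have hbu : ∀ l ∈ u, pvBlank l = true :=
    fun l hl => List.mem_takeWhile_imp (List.mem_reverse.1 hl)
  have hNlLT : ∀ x ∈ LT, pvRstripNl x = x := by
    intro x hx
    exact hNl x (by rw [hdec]; exact List.mem_append_right _ (List.mem_append_left _ hx))
  have hfind : ∀ p : List Char → Bool, (∀ l, pvBlank l = true → p l = false) →
      lines0.reverse.find? p = LT.reverse.find? p := by
    intro p hp
    rw [hdec, List.reverse_append, List.reverse_append, List.find?_append, List.find?_append,
      pv_find_blank_none (fun x hx => hbu x (List.mem_reverse.1 hx)) hp,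
      pv_find_blank_none (fun x hx => hbt x (List.mem_reverse.1 hx)) hp,
      Option.none_or, Option.or_none]
  have hq : (lines0.filter pvB_keep).map pvB_q =
      List.replicate t.length [] ++ (((LT.filter pvB_keep).map pvB_q) ++ List.replicate u.length []) := by
    rw [hdec, List.filter_append, List.filter_append, List.map_append, List.map_append]
    congr 1
    · rw [List.filter_eq_self.2 (fun x hx => pv_blank_keep (hbt x hx)),
        List.map_congr_left (fun x hx => pv_blank_q (hbt x hx)), List.map_const']
    · congr 1
      rw [List.filter_eq_self.2 (fun x hx => pv_blank_keep (hbu x hx)),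
        List.map_congr_left (fun x hx => pv_blank_q (hbu x hx)), List.map_const']
  rw [pv_dropLead_eq, pv_take_endLen, ← hM, ← hLT, pv_fold_eval LT hNlLT [] [] none]
  refine Prod.ext ?_ (Prod.ext ?_ ?_)
  · refine congrArg String.ofList ?_
    rw [hq, pv_strip_join_left, pv_strip_join_right, List.nil_append]
  · refine congrArg (List.map String.ofList) ?_
    simp only [pvB_answers]
    rw [hfind pvB_isAns (fun l hl => pv_blank_not_isAns hl)]
  · refine congrArg (Option.map String.ofList) ?_
    simp only [pvB_hint]
    rw [hfind pvB_isHint (fun l hl => pv_blank_not_isHint hl)]
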